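-- pv_equiv track=rewrite | github.com/connordavel/3d_equivalence_testing_final | 3d_equivalence_testing_scripts/rdkit_oe_3d_compare.py | get_str_symbols
-- ===== SOURCE A (Python) =====
-- def get_str_symbols(string):
--     """
--     returns a dictionary with the symbols as keys and the number of occurences of each symbol as the values from str.
--     This function does not work well for formulas with Ni, Ts, Nb, and some other elements that will not ever be used
--     """
--     letters = dict()
--     ignore = "[]()123456789-+=\?#$:.Hh@"
--     for i in range(len(string)):
--         f = string[i:i+1]
--         n = string[i+1:i+2]
--         if f in ignore:
--             continue
--         if f.isupper():
--             if n in 'ltre':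
--                 i_str = f + n
--             else:
--                 i_str = f
--         elif f in 'bcnops':
--             i_str = f
--         else:
--             continue
--
--         if i_str in letters.keys():
--             letters[i_str] += 1
--         else:
--             letters[i_str] = 1
--
--     return letters
-- ===== SOURCE B (Python) =====
-- import re
-- from collections import Counter
--
--
-- def get_str_symbols(string):
--     # one regex pass tokenizes the element symbols, Counter counts them
--     tokens = re.findall(r'[A-GI-Z][ltre]?|[bcnops]', string)
--     return dict(Counter(tokens))
-- ===== Notes on version B (the rewrite author's own statement) =====
-- stated objective: idiomatic
-- what changed: Replaces A's per-index string-slicing/lookahead state machine that updates the dict inline with a single regex findall tokenization of the string followed by a collections.Counter counting pass.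
import Mathlib
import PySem

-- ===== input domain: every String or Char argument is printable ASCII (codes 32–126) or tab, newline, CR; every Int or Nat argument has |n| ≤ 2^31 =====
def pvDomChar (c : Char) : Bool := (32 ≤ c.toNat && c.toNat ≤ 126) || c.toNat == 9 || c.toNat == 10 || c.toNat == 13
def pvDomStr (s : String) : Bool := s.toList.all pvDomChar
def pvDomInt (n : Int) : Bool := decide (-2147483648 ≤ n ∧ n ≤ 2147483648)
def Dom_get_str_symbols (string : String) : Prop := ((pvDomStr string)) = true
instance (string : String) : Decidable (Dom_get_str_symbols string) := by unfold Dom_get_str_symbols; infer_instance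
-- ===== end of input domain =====

-- B replaces A's per-index lookahead state machine by regex-style tokenization plus a Counter pass (objective: idiomatic).

-- ===== PORT A =====
-- the Python constant string "[]()123456789-+=\?#$:.Hh@" as its character list
def pvIgnore : List Char :=
  ['[', ']', '(', ')', '1', '2', '3', '4', '5', '6', '7', '8', '9', '-', '+', '=',
   '\\', '?', '#', '$', ':', '.', 'H', 'h', '@']

-- hand port of Python str.isupper() (PySem has no strIsupper): at least one cased
-- character and no lowercase one; exact on the ASCII domain
def pyStrIsupper (cs : List Char) : Bool :=
  cs.any PySem.Chars.isalpha && cs.all (fun c => !PySem.Chars.islower c)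

-- the shared tail of A's loop body: "if i_str in letters.keys(): letters[i_str] += 1 else: letters[i_str] = 1"
def bumpA (d : PySem.Dict (List Char) Int) (k : List Char) : PySem.Dict (List Char) Int :=
  if d.contains k then d.insert k (d.getD k 0 + 1) else d.insert k 1

-- one iteration of A's "for i in range(len(string))" loop body
def stepA (cs : List Char) (d : PySem.Dict (List Char) Int) (i : Int) : PySem.Dict (List Char) Int :=
  let f := PySem.List.slice cs (some i) (some (i + 1))
  let n := PySem.List.slice cs (some (i + 1)) (some (i + 2))
  if PySem.Chars.isIn f pvIgnore then d
  else if pyStrIsupper f then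
    bumpA d (if PySem.Chars.isIn n ['l', 't', 'r', 'e'] then f ++ n else f)
  else if PySem.Chars.isIn f ['b', 'c', 'n', 'o', 'p', 's'] then bumpA d f
  else d

def get_str_symbols (string : String) : List (String × Int) :=
  ((PySem.List.pyRange 0 (PySem.Str.len string) 1).foldl (stepA string.toList) PySem.Dict.empty).items.map
    (fun p => (String.ofList p.1, p.2))

-- ===== PORT B =====
-- the regex class [A-GI-Z]: an uppercase letter other than 'H'
def pvUpTok (c : Char) : Bool := PySem.Chars.isupper c && c != 'H'

-- hand port of re.findall(r'[A-GI-Z][ltre]?|[bcnops]', s): left-to-right scan,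
-- first alternative preferred, greedy optional [ltre]; exact for this regex
def tokensB : List Char → List (List Char)
  | [] => []
  | c :: rest =>
    if pvUpTok c then
      match rest with
      | [] => [[c]]
      | d :: rest' =>
        if d ∈ ['l', 't', 'r', 'e'] then [c, d] :: tokensB rest'
        else [c] :: tokensB (d :: rest')
    else if c ∈ ['b', 'c', 'n', 'o', 'p', 's'] then [c] :: tokensB rest
    else tokensB rest

def get_str_symbols_alt (string : String) : List (String × Int) :=
  (PySem.Dict.counter (tokensB string.toList)).items.map (fun p => (String.ofList p.1, p.2))

-- ===== PRECONDITION & SPEC =====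
def Spec_get_str_symbols (string : String) (out : List (String × Int)) : Prop := out = get_str_symbols_alt string
instance (string : String) (out : List (String × Int)) : Decidable (Spec_get_str_symbols string out) := by unfold Spec_get_str_symbols; infer_instance

-- ===== CLAIM (what is proved, stated in full; the proofs are below) =====
def Claim_equal_get_str_symbols : Prop := ∀ (string : String), Dom_get_str_symbols string → Spec_get_str_symbols string (get_str_symbols string)

-- ===== LEMMAS AND PROOFS =====

lemma isIn_nil (l : List Char) : PySem.Chars.isIn [] l = true :=
  (PySem.Chars.isIn_iff_infix [] l).mpr List.nil_infix

lemma isIn_singleton (c : Char) (l : List Char) : PySem.Chars.isIn [c] l = decide (c ∈ l) := by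
  by_cases h : c ∈ l
  · simpa [h] using (PySem.Chars.isIn_iff_infix [c] l).mpr ((List.singleton_infix_iff c l).mpr h)
  · simp only [h, decide_false]
    exact Bool.eq_false_iff.mpr fun hh => h ((List.singleton_infix_iff c l).mp ((PySem.Chars.isIn_iff_infix [c] l).mp hh))

lemma upper_not_lower (c : Char) (h : PySem.Chars.isupper c = true) : PySem.Chars.islower c = false := by
  unfold PySem.Chars.isupper at h; unfold PySem.Chars.islower
  simp at h ⊢
  intro h2
  exact absurd (le_trans h2 h.2) (by decide)

lemma pyStrIsupper_singleton (c : Char) : pyStrIsupper [c] = PySem.Chars.isupper c := by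
  unfold pyStrIsupper PySem.Chars.isalpha
  cases hu : PySem.Chars.isupper c
  · simp [hu]
  · simp [hu, upper_not_lower c hu]

lemma ignore_skipB (c : Char) (h : c ∈ pvIgnore) :
    pvUpTok c = false ∧ c ∉ (['b', 'c', 'n', 'o', 'p', 's'] : List Char) := by
  fin_cases h <;> exact ⟨by decide, by decide⟩

lemma ltre_facts (c : Char) (h : c ∈ (['l', 't', 'r', 'e'] : List Char)) :
    c ∉ pvIgnore ∧ PySem.Chars.isupper c = false ∧ c ∉ (['b', 'c', 'n', 'o', 'p', 's'] : List Char) := by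
  fin_cases h <;> exact ⟨by decide, by decide, by decide⟩

lemma slice_take_one (pre xs : List Char) :
    PySem.List.slice (pre ++ xs) (some (pre.length : Int)) (some ((pre.length : Int) + 1)) = xs.take 1 := by
  have h := PySem.List.slice_natCast_add (pre ++ xs) pre.length 1
  norm_num at h
  simpa [List.drop_left] using h

lemma stepA_eval (pre : List Char) (c : Char) (rest : List Char) (d : PySem.Dict (List Char) Int) :
    stepA (pre ++ c :: rest) d (pre.length : Int) =
      (if c ∈ pvIgnore then d
       else if PySem.Chars.isupper c then
         bumpA d (if PySem.Chars.isIn (rest.take 1) ['l', 't', 'r', 'e'] then [c] ++ rest.take 1 else [c])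
       else if c ∈ (['b', 'c', 'n', 'o', 'p', 's'] : List Char) then bumpA d [c]
       else d) := by
  unfold stepA
  have hf : PySem.List.slice (pre ++ c :: rest) (some (pre.length : Int)) (some ((pre.length : Int) + 1)) = [c] := by
    simpa using slice_take_one pre (c :: rest)
  have hn : PySem.List.slice (pre ++ c :: rest) (some ((pre.length : Int) + 1)) (some ((pre.length : Int) + 2)) = rest.take 1 := by
    have h := slice_take_one (pre ++ [c]) rest
    rw [List.append_assoc] at h
    convert h using 3 <;> simp only [List.length_append, List.length_singleton] <;> push_cast <;> omega
  simp only [hf, hn, isIn_singleton, pyStrIsupper_singleton, decide_eq_true_eq]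

lemma loopA (n : Nat) : ∀ (cs : List Char), cs.length ≤ n → ∀ (pre : List Char) (d : PySem.Dict (List Char) Int),
    (PySem.List.pyRange (pre.length : Int) ((pre.length : Int) + (cs.length : Int)) 1).foldl (stepA (pre ++ cs)) d
      = (tokensB cs).foldl bumpA d := by
  induction n with
  | zero =>
    intro cs h pre d
    obtain rfl : cs = [] := List.length_eq_zero_iff.mp (Nat.le_zero.mp h)
    simp [tokensB, PySem.List.pyRange_one_eq_nil (le_refl _)]
  | succ n ih =>
    intro cs hlen pre d
    match cs with
    | [] => simp [tokensB, PySem.List.pyRange_one_eq_nil (le_refl _)]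
    | c :: rest =>
      rw [PySem.List.pyRange_one_cons (by push_cast [List.length_cons]; omega), List.foldl_cons, stepA_eval]
      have hsplit1 : pre ++ c :: rest = (pre ++ [c]) ++ rest := by simp
      have e1 : (pre.length : Int) + 1 = (((pre ++ [c]).length : Nat) : Int) := by
        simp [List.length_append]
      have e2 : (pre.length : Int) + ((c :: rest).length : Int) = (((pre ++ [c]).length : Nat) : Int) + (rest.length : Int) := by
        push_cast [List.length_append, List.length_cons, List.length_nil]; ring
      have hrest : rest.length ≤ n := Nat.le_of_succ_le_succ (by simpa using hlen)
      by_cases hig : c ∈ pvIgnore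
      · obtain ⟨hu, hb⟩ := ignore_skipB c hig
        rw [if_pos hig]
        have ht : tokensB (c :: rest) = tokensB rest := by
          cases rest <;> simp [tokensB, hu, hb]
        rw [ht, e2, e1, hsplit1]
        exact ih rest hrest (pre ++ [c]) d
      · rw [if_neg hig]
        by_cases hup : PySem.Chars.isupper c = true
        · rw [if_pos hup]
          have hH : c ≠ 'H' := by rintro rfl; exact hig (by decide)
          have hUT : pvUpTok c = true := by simp [pvUpTok, hup, hH]
          cases rest with
          | nil =>
            have ht : tokensB [c] = [[c]] := by simp [tokensB, hUT]
            rw [ht]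
            simp only [List.take_nil, isIn_nil, if_true, List.append_nil]
            rw [PySem.List.pyRange_one_eq_nil (by push_cast [List.length_cons, List.length_nil]; omega)]
            simp
          | cons e rest' =>
            simp only [List.take_succ_cons, List.take_zero]
            rw [isIn_singleton]
            simp only [decide_eq_true_eq]
            by_cases hel : e ∈ (['l', 't', 'r', 'e'] : List Char)
            · rw [if_pos hel]
              have ht : tokensB (c :: e :: rest') = [c, e] :: tokensB rest' := by
                simp [tokensB, hUT, hel]
              obtain ⟨hig2, hup2, hb2⟩ := ltre_facts e hel
              rw [ht, List.foldl_cons]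
              have hlt2 : ((pre.length : Int) + 1) < (pre.length : Int) + ((c :: e :: rest').length : Int) := by
                push_cast [List.length_cons]; omega
              rw [PySem.List.pyRange_one_cons hlt2]
              rw [List.foldl_cons]
              rw [show pre ++ c :: e :: rest' = (pre ++ [c]) ++ e :: rest' by simp]
              rw [e1]
              rw [stepA_eval]
              rw [if_neg hig2, if_neg (by simp [hup2]), if_neg hb2]
              have e1' : (((pre ++ [c]).length : Nat) : Int) + 1 = ((((pre ++ [c]) ++ [e]).length : Nat) : Int) := by
                push_cast [List.length_append, List.length_singleton]; ring
              have e2' : (pre.length : Int) + ((c :: e :: rest').length : Int)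
                  = ((((pre ++ [c]) ++ [e]).length : Nat) : Int) + (rest'.length : Int) := by
                push_cast [List.length_append, List.length_cons, List.length_nil]; ring
              rw [e2', e1', show (pre ++ [c]) ++ e :: rest' = ((pre ++ [c]) ++ [e]) ++ rest' by simp]
              exact ih rest' (by simp at hlen; omega) ((pre ++ [c]) ++ [e]) (bumpA d ([c] ++ [e]))
            · rw [if_neg hel]
              have ht : tokensB (c :: e :: rest') = [c] :: tokensB (e :: rest') := by
                simp [tokensB, hUT, hel]
              rw [ht, List.foldl_cons, e2, e1, hsplit1]
              exact ih (e :: rest') hrest (pre ++ [c]) (bumpA d [c])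
        · rw [if_neg hup]
          have hUT : pvUpTok c = false := by
            simp [pvUpTok, Bool.eq_false_iff.mpr hup]
          by_cases hbc : c ∈ (['b', 'c', 'n', 'o', 'p', 's'] : List Char)
          · rw [if_pos hbc]
            have ht : tokensB (c :: rest) = [c] :: tokensB rest := by
              cases rest <;> simp [tokensB, hUT, hbc]
            rw [ht, List.foldl_cons, e2, e1, hsplit1]
            exact ih rest hrest (pre ++ [c]) (bumpA d [c])
          · rw [if_neg hbc]
            have ht : tokensB (c :: rest) = tokensB rest := by
              cases rest <;> simp [tokensB, hUT, hbc]
            rw [ht, e2, e1, hsplit1]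
            exact ih rest hrest (pre ++ [c]) d

-- ===== VERDICT (by name: the statement is the Claim_ definition above) =====
theorem get_str_symbols_spec : Claim_equal_get_str_symbols := by
  intro s _
  unfold Spec_get_str_symbols get_str_symbols get_str_symbols_alt
  have h := loopA s.toList.length s.toList le_rfl [] PySem.Dict.empty
  simp only [List.length_nil, Nat.cast_zero, List.nil_append, zero_add] at h
  rw [PySem.Str.len_eq, h]
  have hb : bumpA = fun d k => d.insert k (d.getD k 0 + 1) := by
    funext d k
    unfold bumpA
    by_cases hc : d.contains k
    · simp [hc]
    · simp [hc, PySem.Dict.getD_of_not_contains d 0 (by simpa using hc)]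
  rw [hb, PySem.Dict.foldl_insert_getD_add_one_eq_counter]
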